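-- pv_equiv track=rewrite | github.com/antonio-b21/LFA | Lab2/lab2.py | contained
-- ===== SOURCE A (Python) =====
-- def contained(string1, char1):  # check if there is any appearance of char1 in string1 outside of parentheses
--     parentheses = 0  # opened
--     for e in range(len(string1)):
--         if string1[e] == '(':
--             parentheses += 1
--         elif string1[e] == ')':
--             parentheses -= 1
--         elif parentheses == 0 and string1[e] == char1:
--             return 1
--     return 0
-- ===== SOURCE B (Python) =====
-- def contained(string1, char1):
--     # Staged passes: first compute the paren depth *before* each position
--     # (prefix sums of +1/-1 increments), then test whether any non-paren
--     # position at depth 0 carries char1.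
--     depths = []
--     depth = 0
--     for ch in string1:
--         depths.append(depth)
--         depth += (ch == '(') - (ch == ')')
--     return int(any(d == 0 and ch not in '()' and ch == char1
--                    for ch, d in zip(string1, depths)))
-- ===== Notes on version B (the rewrite author's own statement) =====
-- stated objective: alternative
-- what changed: B replaces A's stateful early-return elif scan with staged passes: it first materialises the prefix-sum list of paren depths (arithmetic increments, no branch chain), then answers with a single any() over the string zipped with those depths.
import Mathlib
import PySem

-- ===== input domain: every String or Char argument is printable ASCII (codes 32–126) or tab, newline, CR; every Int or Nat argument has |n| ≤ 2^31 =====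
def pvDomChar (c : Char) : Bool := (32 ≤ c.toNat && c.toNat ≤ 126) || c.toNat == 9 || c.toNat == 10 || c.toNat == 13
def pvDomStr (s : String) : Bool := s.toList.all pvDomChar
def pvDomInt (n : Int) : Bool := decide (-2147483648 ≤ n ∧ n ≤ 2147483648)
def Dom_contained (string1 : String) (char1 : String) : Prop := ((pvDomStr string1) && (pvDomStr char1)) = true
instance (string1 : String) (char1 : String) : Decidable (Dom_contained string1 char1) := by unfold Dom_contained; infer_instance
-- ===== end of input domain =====

-- B replaces A's early-return elif scan with staged passes: a prefix-depth list, then an any() over the zip (alternative decomposition; same O(n)).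


-- ===== PORT A =====
-- A: single scan maintaining the open-paren count; early return 1 on a depth-0 match.
def containedLoop (char1 : String) : Int → List Char → Int
  | _, [] => 0
  | p, c :: rest =>
    if c = '(' then containedLoop char1 (p + 1) rest
    else if c = ')' then containedLoop char1 (p - 1) rest
    else if p = 0 ∧ String.ofList [c] = char1 then 1
    else containedLoop char1 p rest

def contained (string1 : String) (char1 : String) : Int :=
  containedLoop char1 0 string1.toList

-- ===== PORT B =====
-- B phase 1: the paren depth before each position, as prefix sums of arithmetic increments.
def depthsBefore : List Char → Int → List Int
  | [], _ => []
  | c :: rest, d =>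
    d :: depthsBefore rest (d + (if c = '(' then (1 : Int) else 0) - (if c = ')' then (1 : Int) else 0))

-- B phase 2: any() over the string zipped with its depth list.
def contained_alt (string1 : String) (char1 : String) : Int :=
  let cs := string1.toList
  if (cs.zip (depthsBefore cs 0)).any
      (fun cd => cd.2 == 0 && !(cd.1 == '(') && !(cd.1 == ')') && String.ofList [cd.1] == char1)
  then 1 else 0

-- ===== PRECONDITION & SPEC =====
def Spec_contained (string1 : String) (char1 : String) (out : Int) : Prop := out = contained_alt string1 char1
instance (string1 : String) (char1 : String) (out : Int) : Decidable (Spec_contained string1 char1 out) := by unfold Spec_contained; infer_instance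

-- ===== CLAIM (what is proved, stated in full; the proofs are below) =====
def Claim_equal_contained : Prop := ∀ (string1 : String) (char1 : String), Dom_contained string1 char1 → Spec_contained string1 char1 (contained string1 char1)

-- ===== LEMMAS AND PROOFS =====
theorem loop_eq (char1 : String) (l : List Char) : ∀ (p : Int),
    containedLoop char1 p l =
      if (l.zip (depthsBefore l p)).any
          (fun cd => cd.2 == 0 && !(cd.1 == '(') && !(cd.1 == ')') && String.ofList [cd.1] == char1)
      then 1 else 0 := by
  induction l with
  | nil => intro p; simp [containedLoop, depthsBefore]
  | cons c rest ih =>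
    intro p
    by_cases h1 : c = '('
    · subst h1; simp [containedLoop, depthsBefore, ih]
    · by_cases h2 : c = ')'
      · subst h2; simp [containedLoop, depthsBefore, h1, ih, sub_eq_neg_add]
      · by_cases hp : p = 0
        · by_cases hc : String.ofList [c] = char1
          · simp [containedLoop, depthsBefore, h1, h2, hp, hc]
          · simp [containedLoop, depthsBefore, h1, h2, hp, hc, ih]
        · simp [containedLoop, depthsBefore, h1, h2, hp, ih]

-- ===== VERDICT (by name: the statement is the Claim_ definition above) =====
theorem contained_spec : Claim_equal_contained := by
  intro s c _
  unfold Spec_contained contained contained_alt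
  simp only []
  rw [loop_eq]
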